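-- pv_equiv track=rewrite | github.com/costa-group/grey | src/liveness/utils.py | merge_list_swapping_topmost
-- ===== SOURCE A (Python) =====
-- from typing import Dict, List, Optional, Tuple
--
-- def merge_list_swapping_topmost(list_with_nones: List[Optional[str]]) -> List:
--     """
--     Given a lists, generates another list such that all None
--     elements are replaced by other elements, swapping topmost elements
--     to the bottom
--     """
--     i, j = 0, len(list_with_nones) - 1
--     while i <= j:
--         if list_with_nones[i] is None:
--             i += 1
--         elif list_with_nones[j] is None:
--             list_with_nones[j] = list_with_nones[i]
--             i += 1
--             j -= 1
--         else:
--             j -= 1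
--
--     # All the None elements are before index i-1
--     return list_with_nones[i:]
-- ===== SOURCE B (Python) =====
-- from typing import List, Optional
--
-- def merge_list_swapping_topmost(list_with_nones: List[Optional[str]]) -> List:
--     """Two-pass rewrite: collect the non-None values, then fill the None
--     slots of the last-(len-z) suffix backward with them (mutates the input
--     exactly as the original) and return the suffix past the None count."""
--     nn = [x for x in list_with_nones if x is not None]
--     z = len(list_with_nones) - len(nn)
--     s = 0
--     p = len(list_with_nones) - 1
--     while p >= z:
--         if list_with_nones[p] is None:
--             list_with_nones[p] = nn[s]
--             s += 1
--         p -= 1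
--     return list_with_nones[z:]
-- ===== Notes on version B (the rewrite author's own statement) =====
-- stated objective: simpler
-- what changed: Replaces the simultaneous two-pointer sweep (i up, j down, case analysis coupling both ends) by two independent passes: first collect the non-None values and compute the None count z, then walk once backward over the suffix filling each None slot from that list, returning the slice past z.
import Mathlib
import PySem

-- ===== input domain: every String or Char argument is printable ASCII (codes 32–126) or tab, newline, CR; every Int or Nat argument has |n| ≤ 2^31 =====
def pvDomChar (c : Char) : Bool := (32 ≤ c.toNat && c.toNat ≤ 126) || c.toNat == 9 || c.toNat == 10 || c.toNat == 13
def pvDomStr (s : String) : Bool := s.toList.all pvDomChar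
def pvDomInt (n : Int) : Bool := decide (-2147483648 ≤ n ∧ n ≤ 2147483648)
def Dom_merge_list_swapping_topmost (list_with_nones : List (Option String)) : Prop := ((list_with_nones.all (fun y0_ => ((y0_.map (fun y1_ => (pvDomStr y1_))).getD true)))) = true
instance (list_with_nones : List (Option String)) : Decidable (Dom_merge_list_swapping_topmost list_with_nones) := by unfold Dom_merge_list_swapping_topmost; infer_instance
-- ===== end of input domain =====

-- B replaces A's simultaneous two-pointer sweep by two passes — collect the non-None values, then
-- fill the suffix's None slots backward from that list — same linear cost, a plainer decomposition.
-- Both Pythons mutate the argument list identically (the filled None slots); the theorems are about the return value.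


-- ===== PORT A =====
-- A's while loop: i climbs from the bottom, j descends from the top; a None at j is
-- overwritten with list[i].  Whenever the loop body reads or writes, the indices are in
-- range (0 ≤ i ≤ j < len), so List.getD/List.set are exact transcriptions of the Python
-- subscripts there.
def mergeLoopA (xs : List (Option String)) (i : Nat) (j : Int) :
    List (Option String) × Nat :=
  if h : (i : Int) ≤ j then
    if xs.getD i none = none then
      mergeLoopA xs (i + 1) j
    else if xs.getD j.toNat none = none then
      mergeLoopA (xs.set j.toNat (xs.getD i none)) (i + 1) (j - 1)
    else
      mergeLoopA xs i (j - 1)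
  else (xs, i)
termination_by (j + 1 - i).toNat
decreasing_by all_goals omega


-- Python returns the slice list_with_nones[i:]; its elements are all non-None (a consequence
-- of the lemmas below), and filterMap id unwraps the Options to give the declared List String.
def merge_list_swapping_topmost (list_with_nones : List (Option String)) : List String :=
  let r := mergeLoopA list_with_nones 0 ((list_with_nones.length : Int) - 1)
  (r.1.drop r.2).filterMap id

-- ===== PORT B =====
-- B's while loop: p descends from the top to z, filling every None slot with nn[s]
-- (s stays below nn.length on every reachable state, so getD is exact there).
def fillLoopB (nn : List String) (ys : List (Option String)) (s : Nat) (p : Int) (z : Nat) :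
    List (Option String) × Nat :=
  if h : (z : Int) ≤ p then
    if ys.getD p.toNat none = none then
      fillLoopB nn (ys.set p.toNat (some (nn.getD s ""))) (s + 1) (p - 1) z
    else
      fillLoopB nn ys s (p - 1) z
  else (ys, s)
termination_by (p + 1 - z).toNat
decreasing_by all_goals omega


-- Python returns list_with_nones[z:], all non-None after the fill; filterMap id unwraps.
def merge_list_swapping_topmost_alt (list_with_nones : List (Option String)) : List String :=
  let nn := list_with_nones.filterMap id
  let z := list_with_nones.length - nn.length
  let r := fillLoopB nn list_with_nones 0 ((list_with_nones.length : Int) - 1) z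
  (r.1.drop z).filterMap id

-- ===== PRECONDITION & SPEC =====
def Spec_merge_list_swapping_topmost (list_with_nones : List (Option String)) (out : List String) : Prop := out = merge_list_swapping_topmost_alt list_with_nones
instance (list_with_nones : List (Option String)) (out : List String) : Decidable (Spec_merge_list_swapping_topmost list_with_nones out) := by unfold Spec_merge_list_swapping_topmost; infer_instance

-- ===== CLAIM (what is proved, stated in full; the proofs are below) =====
def Claim_equal_merge_list_swapping_topmost : Prop := ∀ (list_with_nones : List (Option String)), Dom_merge_list_swapping_topmost list_with_nones → Spec_merge_list_swapping_topmost list_with_nones (merge_list_swapping_topmost list_with_nones)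

-- ===== LEMMAS AND PROOFS =====
-- Proof plan: both loops are reduced to one reference computation fillQ — a backward fill
-- of the segment [z, p] whose pending replacement values are carried as an explicit queue.
-- mergeLoopA_eq characterises A's two-pointer loop as fillQ fed with the non-None values of
-- the segment's None-count prefix; fillLoopB_eq_fillQ is the direct correspondence for B's
-- loop; fillQ_append says the fill only consumes that prefix of B's longer queue.
def cN (l : List (Option String)) : Nat := l.countP (fun o => o.isNone)

def S (ys : List (Option String)) (z : Nat) (p : Int) : List (Option String) :=
  (ys.drop z).take (p + 1 - z).toNat

def fillQ (ys : List (Option String)) (q : List String) (p : Int) (z : Nat) :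
    List (Option String) :=
  if h : (z : Int) ≤ p then
    if ys.getD p.toNat none = none then
      fillQ (ys.set p.toNat (some (q.headD ""))) q.tail (p - 1) z
    else
      fillQ ys q (p - 1) z
  else ys
termination_by (p + 1 - z).toNat
decreasing_by all_goals omega

-- basic getD bridge
theorem getD_eq_getElem (l : List (Option String)) (i : Nat) (h : i < l.length) :
    l.getD i none = l[i] := by simp [List.getD, List.getElem?_eq_getElem h]

theorem S_nil (ys : List (Option String)) (z : Nat) (p : Int) (h : p < z) :
    S ys z p = [] := by
  have : (p + 1 - (z : Int)).toNat = 0 := by omega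
  simp [S, this]

theorem S_cons (ys : List (Option String)) (z : Nat) (p : Int)
    (hz : z < ys.length) (hzp : (z : Int) ≤ p) :
    S ys z p = ys[z] :: S ys (z + 1) p := by
  have h1 : ys.drop z = ys[z] :: ys.drop (z + 1) := List.drop_eq_getElem_cons hz
  have h2 : (p + 1 - (z : Int)).toNat = (p + 1 - ((z : Nat) + 1 : Nat) : Int).toNat + 1 := by
    push_cast; omega
  rw [S, h1, h2, List.take_succ_cons, S]

theorem S_snoc (ys : List (Option String)) (z : Nat) (p : Int)
    (hzp : (z : Int) ≤ p) (hp : p < ys.length) :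
    S ys z p = S ys z (p - 1) ++ [ys[p.toNat]'(by omega)] := by
  have h2 : (p + 1 - (z : Int)).toNat = (p - (z : Int)).toNat + 1 := by omega
  rw [S, h2, List.take_add_one, S]
  congr 1
  · congr 1; omega
  · rw [List.getElem?_drop]
    have h3 : z + (p - (z : Int)).toNat = p.toNat := by omega
    rw [h3, List.getElem?_eq_getElem (by omega)]
    simp
theorem S_set_high (ys : List (Option String)) (z : Nat) (p : Int) (k : Nat) (v : Option String)
    (hk : p < (k : Int)) :
    S (ys.set k v) z p = S ys z p := by
  rw [S, S, List.drop_set]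
  split
  · rfl
  · rw [List.take_set_of_le (by omega)]

theorem cN_append (l1 l2 : List (Option String)) : cN (l1 ++ l2) = cN l1 + cN l2 :=
  List.countP_append ..

theorem len_filterMap_add_cN (l : List (Option String)) :
    (l.filterMap id).length + cN l = l.length := by
  induction l with
  | nil => simp [cN]
  | cons a t ih => cases a <;> simp [cN] at * <;> omega

theorem fillLoopB_eq_fillQ (nn : List String) (ys : List (Option String)) (s : Nat)
    (p : Int) (z : Nat) :
    (fillLoopB nn ys s p z).1 = fillQ ys (nn.drop s) p z := by
  rw [fillLoopB, fillQ]
  by_cases h : (z : Int) ≤ p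
  · rw [dif_pos h, dif_pos h]
    by_cases hn : ys.getD p.toNat none = none
    · rw [if_pos hn, if_pos hn, fillLoopB_eq_fillQ, List.tail_drop]
      congr 2
      simp [List.getD, List.head?_drop]
    · rw [if_neg hn, if_neg hn, fillLoopB_eq_fillQ]
  · rw [dif_neg h, dif_neg h]
termination_by (p + 1 - z).toNat
decreasing_by all_goals omega

theorem fillQ_append (ys : List (Option String)) (q r : List String) (p : Int) (z : Nat)
    (hlen : p < ys.length) (hc : cN (S ys z p) ≤ q.length) :
    fillQ ys (q ++ r) p z = fillQ ys q p z := by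
  conv_lhs => rw [fillQ]
  conv_rhs => rw [fillQ]
  by_cases h : (z : Int) ≤ p
  · simp only [dif_pos h]
    have hp : p.toNat < ys.length := by omega
    have hsnoc := S_snoc ys z p h hlen
    by_cases hn : ys.getD p.toNat none = none
    · simp only [if_pos hn]
      have hlast : cN [ys[p.toNat]'hp] = 1 := by
        rw [getD_eq_getElem ys p.toNat hp] at hn
        simp [cN, hn]
      rw [hsnoc, cN_append, hlast] at hc
      obtain ⟨a, q', rfl⟩ : ∃ a q', q = a :: q' := by
        cases q with
        | nil => simp at hc
        | cons a q' => exact ⟨a, q', rfl⟩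
      simp only [List.length_cons] at hc
      simp only [List.cons_append, List.headD_cons, List.tail_cons]
      apply fillQ_append
      · rw [List.length_set]; omega
      · rw [S_set_high ys z (p - 1) p.toNat (some a) (by omega)]
        omega
    · simp only [if_neg hn]
      rw [hsnoc, cN_append] at hc
      apply fillQ_append ys q r (p - 1) z (by omega)
      omega
  · simp only [dif_neg h]
termination_by (p + 1 - z).toNat
decreasing_by all_goals omega

theorem mergeLoopA_eq (xs : List (Option String)) (i : Nat) (j : Int)
    (hj : j < xs.length) (hij : (i : Int) ≤ j + 1) :
    mergeLoopA xs i j =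
      (fillQ xs ((S xs i j).take (cN (S xs i j)) |>.filterMap id) j (i + cN (S xs i j)),
       i + cN (S xs i j)) := by
  rw [mergeLoopA]
  by_cases h : (i : Int) ≤ j
  · rw [dif_pos h]
    have hi : i < xs.length := by omega
    have hjt : j.toNat < xs.length := by omega
    have hcons := S_cons xs i j hi h
    by_cases hni : xs.getD i none = none
    · rw [if_pos hni]
      rw [getD_eq_getElem xs i hi] at hni
      rw [mergeLoopA_eq xs (i + 1) j hj (by omega)]
      have hc : cN (S xs i j) = cN (S xs (i + 1) j) + 1 := by
        rw [hcons]
        simp [cN, hni]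
      have hq : ((S xs i j).take (cN (S xs i j))).filterMap id
          = ((S xs (i + 1) j).take (cN (S xs (i + 1) j))).filterMap id := by
        rw [hc, hcons, List.take_succ_cons, hni]
        simp
      have hz : i + 1 + cN (S xs (i + 1) j) = i + cN (S xs i j) := by omega
      rw [hq, hz]
    · by_cases hnj : xs.getD j.toNat none = none
      · rw [if_neg hni, if_pos hnj]
        have hij2 : (i : Int) < j := by
          rcases eq_or_lt_of_le h with heq | hlt
          · exfalso
            have hji : j.toNat = i := by omega
            rw [hji] at hnj
            exact hni hnj
          · exact hlt
        rw [getD_eq_getElem xs i hi] at hni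
        obtain ⟨v, hv⟩ : ∃ v, xs[i]'hi = some v := by
          cases hxi : xs[i]'hi with
          | none => exact absurd hxi hni
          | some v => exact ⟨v, rfl⟩
        have hxj : xs[j.toNat]'hjt = none := by
          rw [getD_eq_getElem xs j.toNat hjt] at hnj; exact hnj
        have hset : xs.set j.toNat (xs.getD i none) = xs.set j.toNat (some v) := by
          rw [getD_eq_getElem xs i hi, hv]
        have hsnoc : S xs (i + 1) j = S xs (i + 1) (j - 1) ++ [xs[j.toNat]'hjt] :=
          S_snoc xs (i + 1) j (by omega) hj
        have hclen : cN (S xs (i + 1) (j - 1)) ≤ (S xs (i + 1) (j - 1)).length :=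
          List.countP_le_length
        have hlenS : ((S xs (i + 1) (j - 1)).length : Int) ≤ j - i - 1 := by
          simp [S]
          omega
        have hc : cN (S xs i j) = cN (S xs (i + 1) (j - 1)) + 1 := by
          rw [hcons, hsnoc]
          simp [cN, hv, hxj]
        rw [hset, mergeLoopA_eq (xs.set j.toNat (some v)) (i + 1) (j - 1)
          (by rw [List.length_set]; omega) (by omega)]
        rw [S_set_high xs (i + 1) (j - 1) j.toNat (some v) (by omega)]
        have hq : ((S xs i j).take (cN (S xs i j))).filterMap id
            = v :: ((S xs (i + 1) (j - 1)).take (cN (S xs (i + 1) (j - 1)))).filterMap id := by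
          rw [hc, hcons, List.take_succ_cons, hv, hsnoc,
            List.take_append_of_le_length hclen]
          simp
        have hzj : ((i + cN (S xs i j) : Nat) : Int) ≤ j := by
          rw [hc]; push_cast; omega
        have hstep : fillQ xs (((S xs i j).take (cN (S xs i j))).filterMap id) j (i + cN (S xs i j))
            = fillQ (xs.set j.toNat (some v))
                (((S xs (i + 1) (j - 1)).take (cN (S xs (i + 1) (j - 1)))).filterMap id)
                (j - 1) (i + cN (S xs i j)) := by
          conv_lhs => rw [fillQ]
          rw [dif_pos hzj, if_pos hnj, hq]
          simp
        rw [hstep]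
        have hz : i + 1 + cN (S xs (i + 1) (j - 1)) = i + cN (S xs i j) := by omega
        rw [hz]
      · rw [if_neg hni, if_neg hnj]
        obtain ⟨w, hw⟩ : ∃ w, xs[j.toNat]'hjt = some w := by
          rw [getD_eq_getElem xs j.toNat hjt] at hnj
          cases hx : xs[j.toNat]'hjt with
          | none => exact absurd hx hnj
          | some w => exact ⟨w, rfl⟩
        rw [mergeLoopA_eq xs i (j - 1) (by omega) (by omega)]
        have hsnoc : S xs i j = S xs i (j - 1) ++ [xs[j.toNat]'hjt] := S_snoc xs i j h hj
        have hc : cN (S xs i j) = cN (S xs i (j - 1)) := by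
          rw [hsnoc]
          simp [cN, hw]
        have hclen : cN (S xs i (j - 1)) ≤ (S xs i (j - 1)).length := List.countP_le_length
        have hlenS : ((S xs i (j - 1)).length : Int) ≤ j - i := by
          simp [S]
          omega
        have hq : ((S xs i j).take (cN (S xs i j))).filterMap id
            = ((S xs i (j - 1)).take (cN (S xs i (j - 1)))).filterMap id := by
          rw [hc, hsnoc, List.take_append_of_le_length hclen]
        have hzj : ((i + cN (S xs i j) : Nat) : Int) ≤ j := by
          rw [hc]; push_cast; omega
        have hstep : fillQ xs (((S xs i j).take (cN (S xs i j))).filterMap id) j (i + cN (S xs i j))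
            = fillQ xs (((S xs i j).take (cN (S xs i j))).filterMap id) (j - 1) (i + cN (S xs i j)) := by
          conv_lhs => rw [fillQ]
          rw [dif_pos hzj, if_neg hnj]
        rw [hstep, hq, hc]
  · rw [dif_neg h]
    have hS : S xs i j = [] := S_nil xs i j (by omega)
    have hfq : fillQ xs [] j i = xs := by
      rw [fillQ, dif_neg (by exact_mod_cast h)]
    simp [hS, cN, hfq]
termination_by (j + 1 - i).toNat
decreasing_by all_goals omega

theorem ports_eq (xs : List (Option String)) :
    merge_list_swapping_topmost xs = merge_list_swapping_topmost_alt xs := by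
  simp only [merge_list_swapping_topmost, merge_list_swapping_topmost_alt]
  have hc0 : cN xs ≤ xs.length := List.countP_le_length
  have hz : xs.length - (xs.filterMap id).length = cN xs := by
    have h := len_filterMap_add_cN xs; omega
  have hSfull : S xs 0 ((xs.length : Int) - 1) = xs := by
    have h1 : ((xs.length : Int) - 1 + 1 - ((0 : Nat) : Int)).toNat = xs.length := by omega
    rw [S, List.drop_zero, h1, List.take_length]
  have hA := mergeLoopA_eq xs 0 ((xs.length : Int) - 1) (by omega) (by omega)
  rw [hSfull] at hA
  rw [hA, fillLoopB_eq_fillQ, hz, List.drop_zero]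
  have hS2 : S xs (cN xs) ((xs.length : Int) - 1) = xs.drop (cN xs) := by
    rw [S]
    apply List.take_of_length_le
    rw [List.length_drop]
    omega
  have hcsplit : cN (xs.take (cN xs)) + cN (xs.drop (cN xs)) = cN xs := by
    rw [← cN_append, List.take_append_drop]
  have hlq : ((xs.take (cN xs)).filterMap id).length + cN (xs.take (cN xs)) = cN xs := by
    have h := len_filterMap_add_cN (xs.take (cN xs))
    rw [List.length_take] at h
    omega
  have hnn : xs.filterMap id = (xs.take (cN xs)).filterMap id ++ (xs.drop (cN xs)).filterMap id := by
    rw [← List.filterMap_append, List.take_append_drop]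
  rw [hnn, fillQ_append xs _ _ ((xs.length : Int) - 1) (cN xs) (by omega) (by rw [hS2]; omega)]
  simp

-- ===== VERDICT (by name: the statement is the Claim_ definition above) =====
theorem merge_list_swapping_topmost_spec : Claim_equal_merge_list_swapping_topmost := by
  intro xs _
  unfold Spec_merge_list_swapping_topmost
  exact ports_eq xs
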